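-- pv_equiv track=rewrite | github.com/maxime-rousselet-cnes/SNREI | utils/classes/descriptions/elasticity_description.py | find_fluid_layers
-- ===== SOURCE A (Python) =====
-- def find_fluid_layers(layer_names: list[str]) -> tuple[int, int]:
--     """
--     Counts the number of layers describing the Inner-Core and the Outer-Core.
--     """
--     below_ICB_layers, below_CMB_layers = 0, 0
--     for layer_name in layer_names:
--         if "FLUID" in layer_name:
--             below_CMB_layers += 1
--         elif below_ICB_layers == below_CMB_layers:
--             below_CMB_layers += 1
--             below_ICB_layers += 1
--         else:
--             return below_ICB_layers, below_CMB_layers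
--     return below_ICB_layers, below_CMB_layers
-- ===== SOURCE B (Python) =====
-- def find_fluid_layers(layer_names: list[str]) -> tuple[int, int]:
--     """
--     Counts the number of layers describing the Inner-Core and the Outer-Core.
--     Two explicit phases: count the leading non-FLUID prefix, then the run of
--     FLUID layers that follows it.
--     """
--     below_ICB = 0
--     for name in layer_names:
--         if "FLUID" in name:
--             break
--         below_ICB += 1
--     below_CMB = below_ICB
--     for name in layer_names[below_ICB:]:
--         if "FLUID" not in name:
--             break
--         below_CMB += 1
--     return below_ICB, below_CMB
-- ===== Notes on version B (the rewrite author's own statement) =====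
-- stated objective: simpler
-- what changed: Replaced the single equality-invariant state machine (with its mid-loop early return) by two plain counting phases: length of the leading non-FLUID prefix, then the length of the FLUID run that follows it.
import Mathlib
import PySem

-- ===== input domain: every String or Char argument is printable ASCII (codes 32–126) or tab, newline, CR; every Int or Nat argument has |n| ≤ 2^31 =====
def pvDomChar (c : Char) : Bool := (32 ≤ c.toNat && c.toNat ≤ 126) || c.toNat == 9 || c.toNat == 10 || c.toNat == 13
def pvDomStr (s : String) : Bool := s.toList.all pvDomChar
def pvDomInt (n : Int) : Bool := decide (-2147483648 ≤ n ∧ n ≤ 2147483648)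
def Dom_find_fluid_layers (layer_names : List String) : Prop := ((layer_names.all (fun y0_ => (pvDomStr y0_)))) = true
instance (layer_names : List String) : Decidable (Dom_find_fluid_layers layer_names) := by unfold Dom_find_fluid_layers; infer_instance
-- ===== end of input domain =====

-- B replaces A's equality-invariant state machine by two explicit counting phases (objective: simpler).

-- ===== PORT A =====
-- A's for-loop with state (below_ICB_layers, below_CMB_layers) and an early return.
def pvGoA : List String → Int → Int → Int × Int
  | [], icb, cmb => (icb, cmb)
  | name :: rest, icb, cmb =>
    if PySem.Str.isIn "FLUID" name then pvGoA rest icb (cmb + 1)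
    else if icb == cmb then pvGoA rest (icb + 1) (cmb + 1)
    else (icb, cmb)

def find_fluid_layers (layer_names : List String) : Int × Int :=
  pvGoA layer_names 0 0

-- ===== PORT B =====
-- phase 1: count the leading non-FLUID prefix (first loop of Source B, with its break)
def pvNonFluidPrefix : List String → Int
  | [] => 0
  | name :: rest =>
    if PySem.Str.isIn "FLUID" name then 0 else pvNonFluidPrefix rest + 1

-- phase 2: count the leading FLUID run (second loop of Source B, with its break)
def pvFluidRun : List String → Int
  | [] => 0
  | name :: rest =>
    if PySem.Str.isIn "FLUID" name then pvFluidRun rest + 1 else 0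

def find_fluid_layers_alt (layer_names : List String) : Int × Int :=
  let below_ICB := pvNonFluidPrefix layer_names
  let below_CMB := below_ICB + pvFluidRun (PySem.List.slice layer_names (some below_ICB) none)
  (below_ICB, below_CMB)

-- ===== PRECONDITION & SPEC =====
def Spec_find_fluid_layers (layer_names : List String) (out : Int × Int) : Prop := out = find_fluid_layers_alt layer_names
instance (layer_names : List String) (out : Int × Int) : Decidable (Spec_find_fluid_layers layer_names out) := by unfold Spec_find_fluid_layers; infer_instance

-- ===== CLAIM (what is proved, stated in full; the proofs are below) =====
def Claim_equal_find_fluid_layers : Prop := ∀ (layer_names : List String), Dom_find_fluid_layers layer_names → Spec_find_fluid_layers layer_names (find_fluid_layers layer_names)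

-- ===== LEMMAS AND PROOFS =====

-- in A's fluid phase (icb < cmb) the loop only counts the leading FLUID run
theorem pvGoA_fluid (xs : List String) (icb cmb : Int) (h : icb < cmb) :
    pvGoA xs icb cmb = (icb, cmb + pvFluidRun xs) := by
  induction xs generalizing cmb with
  | nil => simp [pvGoA, pvFluidRun]
  | cons name rest ih =>
    simp only [pvGoA, pvFluidRun]
    by_cases hf : PySem.Str.isIn "FLUID" name = true
    · rw [if_pos hf, if_pos hf, ih (cmb + 1) (by omega)]
      simp only [Prod.mk.injEq]
      exact ⟨by trivial, by ring⟩
    · rw [if_neg hf, if_neg hf, if_neg (show ¬((icb == cmb) = true) by simp; omega)]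
      simp

-- the prefix count is nonnegative
theorem pvNonFluidPrefix_nonneg (xs : List String) : 0 ≤ pvNonFluidPrefix xs := by
  induction xs with
  | nil => simp [pvNonFluidPrefix]
  | cons name rest ih =>
    simp only [pvNonFluidPrefix]
    by_cases hf : PySem.Str.isIn "FLUID" name = true
    · rw [if_pos hf]
    · rw [if_neg hf]; omega

-- A's loop from the solid phase = B's two counting phases
theorem pvGoA_solid (xs : List String) (k : Int) :
    pvGoA xs k k =
      (k + pvNonFluidPrefix xs,
       k + pvNonFluidPrefix xs + pvFluidRun (xs.drop (pvNonFluidPrefix xs).toNat)) := by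
  induction xs generalizing k with
  | nil => simp [pvGoA, pvNonFluidPrefix, pvFluidRun]
  | cons name rest ih =>
    by_cases hf : PySem.Str.isIn "FLUID" name = true
    · have hp : pvNonFluidPrefix (name :: rest) = 0 := by
        simp only [pvNonFluidPrefix]; rw [if_pos hf]
      have hr : pvFluidRun (name :: rest) = pvFluidRun rest + 1 := by
        simp only [pvFluidRun]; rw [if_pos hf]
      have hg : pvGoA (name :: rest) k k = pvGoA rest k (k + 1) := by
        simp only [pvGoA]; rw [if_pos hf]
      rw [hg, pvGoA_fluid rest k (k + 1) (by omega), hp]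
      simp only [Int.toNat_zero, List.drop_zero, hr, add_zero, Prod.mk.injEq]
      exact ⟨by trivial, by ring⟩
    · have hp : pvNonFluidPrefix (name :: rest) = pvNonFluidPrefix rest + 1 := by
        simp only [pvNonFluidPrefix]; rw [if_neg hf]
      have hg : pvGoA (name :: rest) k k = pvGoA rest (k + 1) (k + 1) := by
        simp only [pvGoA]; rw [if_neg hf, if_pos (show (k == k) = true by simp)]
      have hnn := pvNonFluidPrefix_nonneg rest
      have htn : (pvNonFluidPrefix rest + 1).toNat = (pvNonFluidPrefix rest).toNat + 1 := by
        omega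
      rw [hg, ih (k + 1), hp, htn, List.drop_succ_cons]
      simp only [Prod.mk.injEq]
      exact ⟨by ring, by ring⟩

-- the slice layer_names[p:] with 0 ≤ p is List.drop p.toNat
theorem slice_from_nonneg (xs : List String) (p : Int) (hp : 0 ≤ p) :
    PySem.List.slice xs (some p) none = xs.drop p.toNat := by
  obtain ⟨n, rfl⟩ := Int.eq_ofNat_of_zero_le hp
  simp [PySem.List.slice_from_natCast]

-- ===== VERDICT (by name: the statement is the Claim_ definition above) =====
theorem find_fluid_layers_spec : Claim_equal_find_fluid_layers := by
  intro layer_names _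
  show _ = _
  unfold find_fluid_layers find_fluid_layers_alt
  simp only [pvGoA_solid, slice_from_nonneg layer_names _ (pvNonFluidPrefix_nonneg layer_names)]
  simp
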